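-- pv_equiv track=rewrite | github.com/branislavblazek/micro-bit | accelerometer_basic.py | write_led_code
-- ===== SOURCE A (Python) =====
-- def write_led_code(input_code, dire = 'x', rev = False):
--     code = ''.join(reversed(input_code)) if rev else input_code
--
--     final_string = ''
--     for i_row in range(5):
--         line = ''
--         for i_col in range(5):
--             news = code[i_col]
--             if dire == 'y':
--                 news = code[i_row]
--
--             line += news
--
--         line += ':'
--         final_string += line
--     return final_string
-- ===== SOURCE B (Python) =====
-- def write_led_code(input_code, dire='x', rev=False):
--     code = input_code[::-1] if rev else input_code
--     def cell(p):
--         if p % 6 == 5: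
--             return ':'
--         return code[p // 6] if dire == 'y' else code[p % 6]
--     return ''.join(cell(p) for p in range(30))
-- ===== Notes on version B (the rewrite author's own statement) =====
-- stated objective: alternative
-- what changed: Replaces A's nested row/column loops accumulating line strings with one flat pass over the 30 output positions, computing each character directly from position arithmetic (p%6==5 gives ':', otherwise code[p//6] or code[p%6] depending on direction).
import Mathlib
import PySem

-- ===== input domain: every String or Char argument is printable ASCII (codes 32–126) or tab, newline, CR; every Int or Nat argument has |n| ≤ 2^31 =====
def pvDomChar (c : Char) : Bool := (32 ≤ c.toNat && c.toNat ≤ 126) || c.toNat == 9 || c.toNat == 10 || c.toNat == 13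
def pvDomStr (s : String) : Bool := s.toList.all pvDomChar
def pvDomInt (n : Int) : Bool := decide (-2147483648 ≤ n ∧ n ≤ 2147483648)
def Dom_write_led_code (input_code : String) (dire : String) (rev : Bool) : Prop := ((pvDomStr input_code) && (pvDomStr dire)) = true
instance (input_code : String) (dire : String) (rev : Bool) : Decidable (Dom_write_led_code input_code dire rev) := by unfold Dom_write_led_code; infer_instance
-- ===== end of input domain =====

-- B replaces A's nested row/column loops with one flat pass over the 30 output
-- positions, each character computed from position arithmetic (alternative, not faster).

-- ===== PORT A =====
-- Port of A. Python string concatenation is done on List Char; code[i] raising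
-- IndexError is PySem.List.pyGet? = none, excluded by Pre_ (the .getD ' '
-- default is never reached inside Pre_).
def write_led_code (input_code : String) (dire : String) (rev : Bool) : String :=
  let code : List Char := if rev then input_code.toList.reverse else input_code.toList
  let final : List Char := (List.range 5).foldl (fun final_string i_row =>
    let line : List Char := (List.range 5).foldl (fun line i_col =>
      let news := [(PySem.List.pyGet? code (i_col : Int)).getD ' ']
      let news := if dire = "y" then [(PySem.List.pyGet? code (i_row : Int)).getD ' '] else news
      line ++ news) []
    final_string ++ (line ++ [':'])) []
  String.ofList final

-- ===== PORT B =====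
-- Port of Source B: one map over the 30 output positions; code[p] is pyGet? with the
-- .getD ' ' default unreachable inside Pre_.
def write_led_code_alt (input_code : String) (dire : String) (rev : Bool) : String :=
  let code : List Char := if rev then input_code.toList.reverse else input_code.toList
  let cell : Nat → Char := fun p =>
    if p % 6 = 5 then ':'
    else if dire = "y" then (PySem.List.pyGet? code ((p / 6 : Nat) : Int)).getD ' '
    else (PySem.List.pyGet? code ((p % 6 : Nat) : Int)).getD ' '
  String.ofList ((List.range 30).map cell)

-- ===== PRECONDITION & SPEC =====
-- Pre_ excludes exactly the inputs with fewer than 5 characters, on which A (and B) raise IndexError.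
def Pre_write_led_code (input_code : String) (dire : String) (rev : Bool) : Prop :=
  5 ≤ input_code.toList.length
instance (input_code : String) (dire : String) (rev : Bool) : Decidable (Pre_write_led_code input_code dire rev) := by unfold Pre_write_led_code; infer_instance
def pvWitness_write_led_code : String × String × Bool := ("HELLO", "y", false)
def Spec_write_led_code (input_code : String) (dire : String) (rev : Bool) (out : String) : Prop := out = write_led_code_alt input_code dire rev
instance (input_code : String) (dire : String) (rev : Bool) (out : String) : Decidable (Spec_write_led_code input_code dire rev out) := by unfold Spec_write_led_code; infer_instance

-- ===== CLAIM =====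
def Claim_equal_write_led_code : Prop := ∀ (input_code : String) (dire : String) (rev : Bool), Dom_write_led_code input_code dire rev → Pre_write_led_code input_code dire rev → Spec_write_led_code input_code dire rev (write_led_code input_code dire rev)

-- ===== LEMMAS AND PROOFS =====
theorem write_led_code_eq_alt (input_code : String) (dire : String) (rev : Bool)
    (h : 5 ≤ input_code.toList.length) :
    write_led_code input_code dire rev = write_led_code_alt input_code dire rev := by
  simp only [write_led_code, write_led_code_alt]
  generalize hC : (if rev then input_code.toList.reverse else input_code.toList) = code
  have hlen : 5 ≤ code.length := by
    subst hC; cases rev <;> simpa using h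
  match code, hlen with
  | a :: b :: c :: d :: e :: rest, _ =>
    by_cases hd : dire = "y" <;>
      simp [hd, List.range_succ]

-- ===== VERDICT =====
theorem write_led_code_spec : Claim_equal_write_led_code := by
  intro input_code dire rev _ hpre
  exact write_led_code_eq_alt input_code dire rev hpre
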